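-- pv_equiv track=rewrite | github.com/curtcox/Viewer | reference/templates/servers/definitions/cids.py | _parse_cids_archive
-- ===== SOURCE A (Python) =====
-- def _parse_cids_archive(archive_text: str) -> tuple[dict[str, str], set[str]]:
--     """Parse a CIDS archive into a map of paths to CIDs.
--
--     Args:
--         archive_text: The CIDS archive content
--
--     Returns:
--         Tuple of (cids_map, directories) where:
--         - cids_map: Dict mapping normalized paths to CIDs (with extensions)
--         - directories: Set of directory paths
--
--     Raises:
--         ValueError: If the archive has duplicate paths or invalid format
--     """
--     if not archive_text or not archive_text.strip():
--         raise ValueError("Archive is empty")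
--
--     cids_map = {}
--     directories = set()
--     seen_paths = set()
--
--     for line_num, line in enumerate(archive_text.splitlines(), start=1):
--         line = line.strip()
--         if not line:
--             continue  # Skip empty lines
--
--         parts = line.split(None, 1)  # Split on whitespace, max 2 parts
--         if len(parts) != 2:
--             raise ValueError(f"Line {line_num}: Invalid format. Expected '<path> <CID>', got: {line}")
--
--         path, cid = parts
--
--         # Normalize path (remove leading slash)
--         normalized_path = path.lstrip("/")
--
--         if not normalized_path:
--             raise ValueError(f"Line {line_num}: Empty path")
--
--         if not cid:
--             raise ValueError(f"Line {line_num}: Empty CID")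
--
--         # Check for duplicate paths
--         if normalized_path in seen_paths:
--             raise ValueError(f"Line {line_num}: Duplicate path '{path}'")
--
--         seen_paths.add(normalized_path)
--         cids_map[normalized_path] = cid
--
--         # Track parent directories
--         path_parts = normalized_path.split("/")
--         for i in range(len(path_parts) - 1):
--             dir_path = "/".join(path_parts[:i+1])
--             if dir_path:
--                 directories.add(dir_path)
--
--     return cids_map, directories
-- ===== SOURCE B (Python) =====
-- def _parse_cids_archive(archive_text: str) -> tuple[dict[str, str], set[str]]:
--     """Parse a CIDS archive into a map of paths to CIDs (two-pass variant).
--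
--     First pass: validate lines and build the path->CID map only.
--     Second pass: derive the directory set by scanning each stored path for
--     slash separators and taking the character prefix before each one.
--     """
--     if not archive_text or not archive_text.strip():
--         raise ValueError("Archive is empty")
--
--     cids_map = {}
--
--     for line_num, line in enumerate(archive_text.splitlines(), start=1):
--         line = line.strip()
--         if not line:
--             continue
--
--         parts = line.split(None, 1)
--         if len(parts) != 2:
--             raise ValueError(f"Line {line_num}: Invalid format. Expected '<path> <CID>', got: {line}")
--
--         path, cid = parts
--         normalized_path = path.lstrip("/")
--
--         if not normalized_path:
--             raise ValueError(f"Line {line_num}: Empty path")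
--         if not cid:
--             raise ValueError(f"Line {line_num}: Empty CID")
--         if normalized_path in cids_map:
--             raise ValueError(f"Line {line_num}: Duplicate path '{path}'")
--
--         cids_map[normalized_path] = cid
--
--     directories = set()
--     for path in cids_map:
--         for j, ch in enumerate(path):
--             if ch == "/" and j > 0:
--                 directories.add(path[:j])
--
--     return cids_map, directories
-- ===== Notes on version B (the rewrite author's own statement) =====
-- stated objective: simpler
-- what changed: B drops the seen_paths set and the per-line directory-prefix join loop: one pass validates and builds the path->CID map (duplicates checked against the map itself), then a second pass derives the directory set by scanning each stored path for slash characters and taking the character prefix before each separator, instead of A's split/range/join reconstruction inside the main loop.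
import Mathlib
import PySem

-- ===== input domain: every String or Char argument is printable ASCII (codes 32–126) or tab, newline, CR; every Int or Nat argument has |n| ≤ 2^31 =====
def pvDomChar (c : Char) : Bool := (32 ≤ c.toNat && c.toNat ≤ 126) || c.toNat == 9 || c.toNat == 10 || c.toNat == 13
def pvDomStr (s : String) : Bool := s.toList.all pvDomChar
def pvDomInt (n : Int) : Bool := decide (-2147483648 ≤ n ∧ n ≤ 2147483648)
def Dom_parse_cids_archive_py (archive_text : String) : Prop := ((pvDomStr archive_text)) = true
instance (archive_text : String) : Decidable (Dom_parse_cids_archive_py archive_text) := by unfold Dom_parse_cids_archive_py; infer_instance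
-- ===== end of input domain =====

-- B replaces A's per-line seen_paths/directory bookkeeping by a single map-building pass followed by a
-- separate pass that derives the directory set by scanning each stored path for slash separators (objective: simpler).

-- ===== PORT A =====

-- s.lstrip("/") : drop the leading '/' characters (exact: lstrip with an explicit char set)
def pvLstripSlash (s : String) : String := String.ofList (s.toList.dropWhile (fun c => c == '/'))

-- the inner 'for i in range(len(path_parts) - 1)' loop of A, for one normalized path
def pvDirsAddA (dirs : PySem.Set String) (normalized_path : String) : PySem.Set String :=
  let path_parts : List String := (PySem.Str.split? normalized_path "/").getD []  -- np.split("/"); sep ≠ "" so never none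
  (PySem.List.pyRange 0 (PySem.List.len path_parts - 1) 1).foldl
    (fun ds i =>
      let dir_path := PySem.Str.join "/" (PySem.List.slice path_parts none (some (i + 1)))
      if dir_path ≠ "" then PySem.Set.add ds dir_path else ds)
    dirs

-- one iteration of A's main loop; 'none' marks a raised ValueError (line numbers only feed messages, so
-- enumerate(..., start=1) is not carried)
def pvStepA (st : Option (PySem.Dict String String × PySem.Set String × PySem.Set String))
    (line : String) : Option (PySem.Dict String String × PySem.Set String × PySem.Set String) :=
  match st with
  | none => none
  | some (cids_map, dirs, seen) =>
    let line := PySem.Str.strip line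
    if line = "" then some (cids_map, dirs, seen)
    else
      let parts := PySem.Str.split₀Max line 1
      if parts.length ≠ 2 then none
      else
        let path := parts.getD 0 ""
        let cid := parts.getD 1 ""
        let normalized_path := pvLstripSlash path
        if normalized_path = "" then none
        else if cid = "" then none
        else if PySem.Set.contains seen normalized_path then none
        else
          some (cids_map.insert normalized_path cid,
                pvDirsAddA dirs normalized_path,
                PySem.Set.add seen normalized_path)

def parse_cids_archive_py (archive_text : String) : (List (String × String)) × List String :=
  if archive_text = "" ∨ PySem.Str.strip archive_text = "" then ([], [])  -- ValueError "Archive is empty": outside Pre_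
  else
    match (PySem.Str.splitlines archive_text).foldl pvStepA
        (some (PySem.Dict.empty, ([] : PySem.Set String), ([] : PySem.Set String))) with
    | none => ([], [])  -- a ValueError was raised: outside Pre_
    | some (cids_map, dirs, _) => (cids_map.items, dirs)

-- ===== PORT B =====

-- one iteration of B's first loop: validation + map building only
def pvStepB (st : Option (PySem.Dict String String)) (line : String) :
    Option (PySem.Dict String String) :=
  match st with
  | none => none
  | some cids_map =>
    let line := PySem.Str.strip line
    if line = "" then some cids_map
    else
      let parts := PySem.Str.split₀Max line 1
      if parts.length ≠ 2 then none
      else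
        let path := parts.getD 0 ""
        let cid := parts.getD 1 ""
        let normalized_path := pvLstripSlash path
        if normalized_path = "" then none
        else if cid = "" then none
        else if cids_map.contains normalized_path then none
        else some (cids_map.insert normalized_path cid)

-- B's second pass, for one stored path: at every slash with a nonempty prefix, add that prefix
def pvDirsAddB (dirs : PySem.Set String) (path : String) : PySem.Set String :=
  (PySem.List.enumerate path.toList).foldl
    (fun ds jc =>
      if jc.2 = '/' ∧ 0 < jc.1 then PySem.Set.add ds (PySem.Str.slice path none (some jc.1)) else ds)
    dirs

def parse_cids_archive_py_alt (archive_text : String) : (List (String × String)) × List String :=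
  if archive_text = "" ∨ PySem.Str.strip archive_text = "" then ([], [])  -- ValueError: outside Pre_
  else
    match (PySem.Str.splitlines archive_text).foldl pvStepB (some PySem.Dict.empty) with
    | none => ([], [])  -- a ValueError was raised: outside Pre_
    | some cids_map => (cids_map.items, cids_map.keys.foldl pvDirsAddB ([] : PySem.Set String))

-- ===== PRECONDITION & SPEC =====

-- the stripped non-blank lines of the archive
def pvGood (ls : List String) : List String := (ls.map PySem.Str.strip).filter (· ≠ "")
-- normalized path and CID of a (stripped, well-formed) line
def pvNP (l : String) : String := pvLstripSlash ((PySem.Str.split₀Max l 1).getD 0 "")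
def pvCID (l : String) : String := (PySem.Str.split₀Max l 1).getD 1 ""
def pvNPs (ls : List String) : List String := (pvGood ls).map pvNP

-- Pre_ excludes exactly the inputs on which A raises ValueError: blank archives, lines without a
-- whitespace-separated path/CID pair, paths that normalize to the empty string, and duplicate normalized paths.
def Pre_parse_cids_archive_py (archive_text : String) : Prop :=
  PySem.Str.strip archive_text ≠ "" ∧
  (∀ l ∈ pvGood (PySem.Str.splitlines archive_text),
      (PySem.Str.split₀Max l 1).length = 2 ∧ pvNP l ≠ "" ∧ pvCID l ≠ "") ∧
  (pvNPs (PySem.Str.splitlines archive_text)).Nodup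
instance (archive_text : String) : Decidable (Pre_parse_cids_archive_py archive_text) := by
  unfold Pre_parse_cids_archive_py; infer_instance

def pvWitness_parse_cids_archive_py : String := "a/b X\n/c Y\n"

def Spec_parse_cids_archive_py (archive_text : String)
    (out : (List (String × String)) × List String) : Prop :=
  out = parse_cids_archive_py_alt archive_text
instance (archive_text : String) (out : (List (String × String)) × List String) :
    Decidable (Spec_parse_cids_archive_py archive_text out) := by
  unfold Spec_parse_cids_archive_py; infer_instance

-- ===== CLAIM (what is proved, stated in full; the proofs are below) =====
def Claim_equal_parse_cids_archive_py : Prop :=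
  ∀ (archive_text : String), Dom_parse_cids_archive_py archive_text →
    Pre_parse_cids_archive_py archive_text →
    Spec_parse_cids_archive_py archive_text (parse_cids_archive_py archive_text)

-- ===== LEMMAS AND PROOFS =====

-- A's np.split("/") as a plain structural recursion
def pvSplitSlash : List Char → List (List Char)
  | [] => [[]]
  | c :: rest =>
    if c = '/' then [] :: pvSplitSlash rest
    else
      match pvSplitSlash rest with
      | [] => [[c]]
      | p :: ps => (c :: p) :: ps

-- the character prefixes of 'pre ++ rest' ending just before each '/' of rest, in order
def pvPrefs (pre : List Char) : List Char → List (List Char)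
  | [] => []
  | c :: rest => if c = '/' then pre :: pvPrefs (pre ++ [c]) rest else pvPrefs (pre ++ [c]) rest

theorem pvSplitSlash_ne_nil (cs : List Char) : pvSplitSlash cs ≠ [] := by
  cases cs with
  | nil => simp [pvSplitSlash]
  | cons c rest =>
    simp only [pvSplitSlash]
    split_ifs
    · simp
    · cases h : pvSplitSlash rest <;> simp

theorem pv_go_step (fuel : Nat) (c : Char) (rest cur : List Char) (acc : List (List Char)) :
    PySem.Chars.splitOn.go ['/'] (fuel+1) (c :: rest) cur acc =
      if c = '/' then PySem.Chars.splitOn.go ['/'] fuel rest [] (cur.reverse :: acc)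
      else PySem.Chars.splitOn.go ['/'] fuel rest (c :: cur) acc := by
  rw [PySem.Chars.splitOn.go]
  by_cases h : c = '/'
  · subst h
    simp only [List.isPrefixOf, beq_self_eq_true, Bool.and_self, if_pos,
      List.length_cons, List.length_nil, List.drop_succ_cons, List.drop_zero]
  · have hb : ('/' == c) = false := by simp [Ne.symm h]
    simp only [List.isPrefixOf, hb, Bool.false_and, Bool.false_eq_true, if_false, h]

theorem pv_go_nil (fuel : Nat) (cur : List Char) (acc : List (List Char)) :
    PySem.Chars.splitOn.go ['/'] fuel [] cur acc = acc.reverse ++ [cur.reverse] := by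
  cases fuel <;> rw [PySem.Chars.splitOn.go] <;> simp

theorem pv_go_eq (fuel : Nat) (l cur : List Char) (acc : List (List Char)) (h : l.length < fuel) :
    PySem.Chars.splitOn.go ['/'] fuel l cur acc =
      acc.reverse ++
        (match pvSplitSlash l with
         | [] => []
         | p :: ps => (cur.reverse ++ p) :: ps) := by
  induction fuel generalizing l cur acc with
  | zero => omega
  | succ fuel ih =>
    cases l with
    | nil => simp [pv_go_nil, pvSplitSlash]
    | cons c rest =>
      rw [pv_go_step]
      by_cases hc : c = '/'
      · subst hc
        rw [if_pos rfl, ih rest [] _ (by simpa using h)]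
        cases hs : pvSplitSlash rest with
        | nil => exact absurd hs (pvSplitSlash_ne_nil rest)
        | cons p ps => simp [pvSplitSlash, hs]
      · rw [if_neg hc, ih rest (c :: cur) acc (by simpa using h)]
        cases hs : pvSplitSlash rest with
        | nil => exact absurd hs (pvSplitSlash_ne_nil rest)
        | cons p ps => simp [pvSplitSlash, hs, hc]

theorem pv_splitOn_eq (cs : List Char) : PySem.Chars.splitOn cs ['/'] = pvSplitSlash cs := by
  rw [PySem.Chars.splitOn, pv_go_eq _ _ _ _ (by omega)]
  cases hs : pvSplitSlash cs with
  | nil => exact absurd hs (pvSplitSlash_ne_nil cs)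
  | cons p ps => simp

theorem pv_join_singleton (p : List Char) : PySem.Chars.join ['/'] [p] = p := by
  simp only [PySem.Chars.join, List.intercalate, List.intersperse, List.flatten]
  simp

theorem pv_join_cons (p q : List Char) (l : List (List Char)) :
    PySem.Chars.join ['/'] (p :: q :: l) = p ++ '/' :: PySem.Chars.join ['/'] (q :: l) := by
  simp only [PySem.Chars.join, List.intercalate, List.intersperse_cons₂, List.flatten_cons]
  simp

theorem pv_join_cons' (p : List Char) (l : List (List Char)) (h : l ≠ []) :
    PySem.Chars.join ['/'] (p :: l) = p ++ '/' :: PySem.Chars.join ['/'] l := by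
  cases l with
  | nil => exact absurd rfl h
  | cons q l => exact pv_join_cons p q l

theorem pv_join_cons_head (c : Char) (p : List Char) (l : List (List Char)) :
    PySem.Chars.join ['/'] ((c :: p) :: l) = c :: PySem.Chars.join ['/'] (p :: l) := by
  cases l with
  | nil => rw [pv_join_singleton, pv_join_singleton]
  | cons q l => rw [pv_join_cons, pv_join_cons]; simp

theorem pv_join_take (cs pre : List Char) :
    (List.range ((pvSplitSlash cs).length - 1)).map
        (fun i => pre ++ PySem.Chars.join ['/'] ((pvSplitSlash cs).take (i + 1)))
      = pvPrefs pre cs := by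
  induction cs generalizing pre with
  | nil => simp [pvSplitSlash, pvPrefs]
  | cons c rest ih =>
    obtain ⟨p, ps, hS⟩ : ∃ p ps, pvSplitSlash rest = p :: ps := by
      cases h : pvSplitSlash rest with
      | nil => exact absurd h (pvSplitSlash_ne_nil rest)
      | cons p ps => exact ⟨p, ps, rfl⟩
    by_cases hc : c = '/'
    · subst hc
      have hsplit : pvSplitSlash ('/' :: rest) = [] :: p :: ps := by
        simp [pvSplitSlash, hS]
      rw [hsplit]
      have hlen : ([] :: p :: ps : List (List Char)).length - 1 = ps.length + 1 := by simp
      rw [hlen, List.range_succ_eq_map, List.map_cons, List.map_map]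
      have hR : pvPrefs pre ('/' :: rest) = pre :: pvPrefs (pre ++ ['/']) rest := by
        simp [pvPrefs]
      rw [hR]
      congr 1
      · simp
      · rw [← ih (pre ++ ['/']), hS]
        apply List.map_congr_left
        intro i hi
        simp only [Function.comp_apply, Nat.succ_eq_add_one]
        have htk : (([] : List Char) :: p :: ps).take (i + 1 + 1) = [] :: (p :: ps).take (i + 1) := by
          simp
        rw [htk, pv_join_cons' [] _ (by simp [List.take_succ_cons])]
        simp
    · have hsplit : pvSplitSlash (c :: rest) = (c :: p) :: ps := by
        simp [pvSplitSlash, hS, hc]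
      rw [hsplit]
      have hR : pvPrefs pre (c :: rest) = pvPrefs (pre ++ [c]) rest := by
        simp [pvPrefs, hc]
      rw [hR, ← ih (pre ++ [c]), hS]
      have hlen : ((c :: p) :: ps : List (List Char)).length - 1 = (p :: ps).length - 1 := by simp
      rw [hlen]
      apply List.map_congr_left
      intro i hi
      have htk : ((c :: p) :: ps).take (i + 1) = (c :: p) :: ps.take i := by
        simp [List.take_succ_cons]
      have htk2 : (p :: ps).take (i + 1) = p :: ps.take i := by
        simp [List.take_succ_cons]
      rw [htk, htk2, pv_join_cons_head]
      simp

theorem pv_enum_prefs (rest : List Char) : ∀ pre : List Char,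
    ((PySem.List.enumerate rest ((pre.length : Int))).filter
        (fun jc => decide (jc.2 = '/' ∧ 0 < jc.1))).map
        (fun jc => PySem.List.slice (pre ++ rest) none (some jc.1))
      = (pvPrefs pre rest).filter (· ≠ []) := by
  induction rest with
  | nil => intro pre; simp [PySem.List.enumerate_nil, pvPrefs]
  | cons c rest ih =>
    intro pre
    rw [PySem.List.enumerate_cons, List.filter_cons]
    by_cases hc : c = '/'
    · subst hc
      by_cases hp : pre = []
      · subst hp
        rw [if_neg (by simp)]
        have ih' := ih ['/']
        simp only [List.singleton_append, List.length_cons, List.length_nil, Nat.cast_zero,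
          Nat.cast_one, zero_add, List.nil_append] at ih' ⊢
        rw [ih']
        have hR : pvPrefs [] ('/' :: rest) = [] :: pvPrefs ['/'] rest := by
          simp [pvPrefs]
        rw [hR, List.filter_cons]
        simp
      · rw [if_pos (by simp; exact List.length_pos_iff.mpr hp)]
        rw [List.map_cons]
        have hsl : PySem.List.slice (pre ++ '/' :: rest) none (some ((pre.length : Nat) : Int))
            = pre := by
          rw [PySem.List.slice_to_natCast, List.take_left]
        rw [hsl]
        rw [show ((pre.length : Int) + 1) = (((pre ++ ['/']).length : Nat) : Int) by simp]
        rw [show (pre ++ '/' :: rest) = ((pre ++ ['/']) ++ rest) from List.append_cons pre '/' rest]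
        rw [ih (pre ++ ['/'])]
        have hR : pvPrefs pre ('/' :: rest) = pre :: pvPrefs (pre ++ ['/']) rest := by
          simp [pvPrefs]
        rw [hR, List.filter_cons]
        rw [if_pos (by simp [hp])]
    · rw [if_neg (by simp [hc])]
      rw [show ((pre.length : Int) + 1) = (((pre ++ [c]).length : Nat) : Int) by simp]
      rw [show (pre ++ c :: rest) = ((pre ++ [c]) ++ rest) from List.append_cons pre c rest]
      rw [ih (pre ++ [c])]
      have hR : pvPrefs pre (c :: rest) = pvPrefs (pre ++ [c]) rest := by
        simp [pvPrefs, hc]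
      rw [hR]

theorem pv_str_join_ofList (X : List (List Char)) :
    PySem.Str.join "/" (X.map String.ofList) = String.ofList (PySem.Chars.join ['/'] X) := by
  rw [PySem.Str.join]
  congr 1
  rw [List.map_map,
    show String.toList ∘ String.ofList = id from funext fun l => String.toList_ofList,
    List.map_id]
  rfl

theorem pv_fold_if {α : Type} (p : α → Prop) [DecidablePred p] (f : α → String)
    (l : List α) (ds : PySem.Set String) :
    l.foldl (fun ds x => if p x then PySem.Set.add ds (f x) else ds) ds
      = ((l.filter (fun x => decide (p x))).map f).foldl PySem.Set.add ds := by
  induction l generalizing ds with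
  | nil => rfl
  | cons a l ih => by_cases h : p a <;> simp [h, ih]

theorem pv_filter_map_ne {α : Type} (f : α → String) (l : List α) :
    (l.filter (fun x => decide (f x ≠ ""))).map f = (l.map f).filter (· ≠ "") := by
  induction l with
  | nil => rfl
  | cons a l ih =>
    simp only [List.filter_cons, List.map_cons]
    by_cases h : f a = ""
    · rw [if_neg (by simp [h]), if_neg (by simp [h])]
      exact ih
    · rw [if_pos (by simp [h]), if_pos (by simp [h]), List.map_cons, ih]

theorem pv_filter_ofList (l : List (List Char)) :
    (l.map String.ofList).filter (· ≠ "") = (l.filter (· ≠ [])).map String.ofList := by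
  induction l with
  | nil => rfl
  | cons a l ih =>
    by_cases h : a = []
    · subst h
      simp only [List.map_cons, List.filter_cons]
      rw [if_neg (by simp), if_neg (by simp)]
      exact ih
    · simp only [List.map_cons, List.filter_cons]
      rw [if_pos (by simp [← String.toList_inj, h]), if_pos (by simp [h])]
      rw [List.map_cons, ih]

theorem pvDirsAdd_eq (ds : PySem.Set String) (np : String) :
    pvDirsAddA ds np = pvDirsAddB ds np := by
  have hsepl : ("/" : String).toList = ['/'] := rfl
  have hne := pvSplitSlash_ne_nil np.toList
  have hNpos : 1 ≤ (pvSplitSlash np.toList).length := List.length_pos_iff.mpr hne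
  have hparts : (PySem.Str.split? np "/").getD [] = (pvSplitSlash np.toList).map String.ofList := by
    simp [PySem.Str.split?, PySem.Chars.split?, hsepl, pv_splitOn_eq]
  -- the per-index string A joins
  have hmap : (List.range ((pvSplitSlash np.toList).length - 1)).map
        (fun j : Nat => PySem.Str.join "/"
          (PySem.List.slice ((pvSplitSlash np.toList).map String.ofList) none (some ((j : Int) + 1))))
      = (pvPrefs [] np.toList).map String.ofList := by
    rw [← pv_join_take np.toList [], List.map_map]
    apply List.map_congr_left
    intro j _
    have hcast : ((j : Int) + 1) = (((j + 1 : Nat)) : Int) := by push_cast; ring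
    rw [hcast, PySem.List.slice_to_natCast, ← List.map_take, pv_str_join_ofList]
    simp
  have hA : pvDirsAddA ds np =
      (((pvPrefs [] np.toList).filter (· ≠ [])).map String.ofList).foldl PySem.Set.add ds := by
    simp only [pvDirsAddA]
    rw [hparts, PySem.List.len_eq, List.length_map]
    rw [show (((pvSplitSlash np.toList).length : Int) - 1)
        = (((pvSplitSlash np.toList).length - 1 : Nat) : Int) by omega]
    rw [PySem.List.pyRange_zero_nat, List.foldl_map]
    rw [pv_fold_if (p := fun j : Nat => PySem.Str.join "/"
        (PySem.List.slice ((pvSplitSlash np.toList).map String.ofList) none (some ((j : Int) + 1))) ≠ "")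
      (f := fun j : Nat => PySem.Str.join "/"
        (PySem.List.slice ((pvSplitSlash np.toList).map String.ofList) none (some ((j : Int) + 1))))]
    rw [pv_filter_map_ne, hmap, pv_filter_ofList]
  have hB : pvDirsAddB ds np =
      (((pvPrefs [] np.toList).filter (· ≠ [])).map String.ofList).foldl PySem.Set.add ds := by
    simp only [pvDirsAddB]
    rw [pv_fold_if (p := fun jc : Int × Char => jc.2 = '/' ∧ 0 < jc.1)
      (f := fun jc : Int × Char => PySem.Str.slice np none (some jc.1))]
    congr 1
    have he : PySem.List.enumerate np.toList (0 : Int)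
        = PySem.List.enumerate np.toList ((([] : List Char).length : Nat) : Int) := by norm_num
    rw [he]
    have hfun : ∀ jc : Int × Char, PySem.Str.slice np none (some jc.1)
        = String.ofList (PySem.List.slice (([] : List Char) ++ np.toList) none (some jc.1)) := by
      intro jc
      rw [PySem.Str.slice]
      congr 1
    rw [List.map_congr_left (fun jc _ => hfun jc)]
    rw [show (fun jc : Int × Char =>
          String.ofList (PySem.List.slice (([] : List Char) ++ np.toList) none (some jc.1)))
        = String.ofList ∘ (fun jc : Int × Char =>
          PySem.List.slice (([] : List Char) ++ np.toList) none (some jc.1)) from rfl]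
    rw [← List.map_map, pv_enum_prefs np.toList []]
  rw [hA, hB]

theorem pvGood_cons (l : String) (ls : List String) :
    pvGood (l :: ls) = if PySem.Str.strip l = "" then pvGood ls
      else PySem.Str.strip l :: pvGood ls := by
  simp only [pvGood, List.map_cons, List.filter_cons]
  by_cases h : PySem.Str.strip l = ""
  · rw [if_pos h, if_neg (by simp [h])]
  · rw [if_neg h, if_pos (by simp [h])]

theorem pv_contains_false {s : PySem.Set String} {x : String} (h : x ∉ s) :
    PySem.Set.contains s x = false := by
  rw [Bool.eq_false_iff]
  intro hc
  exact h ((PySem.Set.contains_iff s x).mp hc)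

theorem pvStepA_fold (ls : List String) (m : PySem.Dict String String)
    (dirs seen : PySem.Set String)
    (hok : ∀ l ∈ pvGood ls, (PySem.Str.split₀Max l 1).length = 2 ∧ pvNP l ≠ "" ∧ pvCID l ≠ "")
    (hnd : (pvNPs ls).Nodup)
    (hseen : ∀ x ∈ pvNPs ls, PySem.Set.contains seen x = false) :
    ls.foldl pvStepA (some (m, dirs, seen)) =
      some ((pvGood ls).foldl (fun m l => m.insert (pvNP l) (pvCID l)) m,
            (pvNPs ls).foldl pvDirsAddA dirs,
            PySem.Set.update seen (pvNPs ls)) := by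
  induction ls generalizing m dirs seen with
  | nil => simp [pvGood, pvNPs, PySem.Set.update]
  | cons l ls ih =>
    rw [List.foldl_cons]
    by_cases hl : PySem.Str.strip l = ""
    · have hstep : pvStepA (some (m, dirs, seen)) l = some (m, dirs, seen) := by
        simp [pvStepA, hl]
      have hg : pvGood (l :: ls) = pvGood ls := by rw [pvGood_cons, if_pos hl]
      have hn : pvNPs (l :: ls) = pvNPs ls := by simp [pvNPs, hg]
      rw [hstep, hg, hn]
      exact ih m dirs seen (fun l' hl' => hok l' (by rw [hg]; exact hl'))
        (by rw [← hn]; exact hnd) (fun x hx => hseen x (by rw [hn]; exact hx))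
    · have hg : pvGood (l :: ls) = PySem.Str.strip l :: pvGood ls := by
        rw [pvGood_cons, if_neg hl]
      have hn : pvNPs (l :: ls) = pvNP (PySem.Str.strip l) :: pvNPs ls := by
        simp [pvNPs, hg]
      obtain ⟨hlen2, hnp, hcid⟩ := hok (PySem.Str.strip l) (by rw [hg]; exact List.mem_cons_self)
      have hcont : PySem.Set.contains seen (pvNP (PySem.Str.strip l)) = false :=
        hseen _ (by rw [hn]; exact List.mem_cons_self)
      have hstep : pvStepA (some (m, dirs, seen)) l =
          some (m.insert (pvNP (PySem.Str.strip l)) (pvCID (PySem.Str.strip l)),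
                pvDirsAddA dirs (pvNP (PySem.Str.strip l)),
                PySem.Set.add seen (pvNP (PySem.Str.strip l))) := by
        simp only [pvStepA]
        rw [if_neg hl]
        rw [if_neg (by omega : ¬ (PySem.Str.split₀Max (PySem.Str.strip l) 1).length ≠ 2)]
        rw [if_neg (show ¬ pvLstripSlash ((PySem.Str.split₀Max (PySem.Str.strip l) 1).getD 0 "") = ""
          from hnp)]
        rw [if_neg (show ¬ (PySem.Str.split₀Max (PySem.Str.strip l) 1).getD 1 "" = "" from hcid)]
        rw [show PySem.Set.contains seen
            (pvLstripSlash ((PySem.Str.split₀Max (PySem.Str.strip l) 1).getD 0 "")) = false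
          from hcont]
        simp [pvNP, pvCID]
      have hnd' : (pvNP (PySem.Str.strip l) :: pvNPs ls).Nodup := by rw [← hn]; exact hnd
      have hnotmem : pvNP (PySem.Str.strip l) ∉ pvNPs ls := (List.nodup_cons.mp hnd').1
      have hseen' : ∀ x ∈ pvNPs ls,
          PySem.Set.contains (PySem.Set.add seen (pvNP (PySem.Str.strip l))) x = false := by
        intro x hx
        apply pv_contains_false
        intro hmem
        rw [PySem.Set.mem_add] at hmem
        rcases hmem with hmem | rfl
        · have hf := hseen x (by rw [hn]; exact List.mem_cons_of_mem _ hx)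
          have ht := (PySem.Set.contains_iff seen x).mpr hmem
          rw [hf] at ht
          exact absurd ht (by simp)
        · exact hnotmem hx
      rw [hstep, hg, hn, List.foldl_cons, List.foldl_cons, PySem.Set.update_cons]
      exact ih _ _ _ (fun l' hl' => hok l' (by rw [hg]; exact List.mem_cons_of_mem _ hl'))
        (List.nodup_cons.mp hnd').2 hseen'

theorem pvStepB_fold (ls : List String) (m : PySem.Dict String String)
    (hok : ∀ l ∈ pvGood ls, (PySem.Str.split₀Max l 1).length = 2 ∧ pvNP l ≠ "" ∧ pvCID l ≠ "")
    (hnd : (pvNPs ls).Nodup)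
    (hm : ∀ x ∈ pvNPs ls, m.contains x = false) :
    ls.foldl pvStepB (some m) =
      some ((pvGood ls).foldl (fun m l => m.insert (pvNP l) (pvCID l)) m) := by
  induction ls generalizing m with
  | nil => simp [pvGood]
  | cons l ls ih =>
    rw [List.foldl_cons]
    by_cases hl : PySem.Str.strip l = ""
    · have hstep : pvStepB (some m) l = some m := by simp [pvStepB, hl]
      have hg : pvGood (l :: ls) = pvGood ls := by rw [pvGood_cons, if_pos hl]
      have hn : pvNPs (l :: ls) = pvNPs ls := by simp [pvNPs, hg]
      rw [hstep, hg]
      exact ih m (fun l' hl' => hok l' (by rw [hg]; exact hl'))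
        (by rw [← hn]; exact hnd) (fun x hx => hm x (by rw [hn]; exact hx))
    · have hg : pvGood (l :: ls) = PySem.Str.strip l :: pvGood ls := by
        rw [pvGood_cons, if_neg hl]
      have hn : pvNPs (l :: ls) = pvNP (PySem.Str.strip l) :: pvNPs ls := by
        simp [pvNPs, hg]
      obtain ⟨hlen2, hnp, hcid⟩ := hok (PySem.Str.strip l) (by rw [hg]; exact List.mem_cons_self)
      have hcont : m.contains (pvNP (PySem.Str.strip l)) = false :=
        hm _ (by rw [hn]; exact List.mem_cons_self)
      have hstep : pvStepB (some m) l =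
          some (m.insert (pvNP (PySem.Str.strip l)) (pvCID (PySem.Str.strip l))) := by
        simp only [pvStepB]
        rw [if_neg hl]
        rw [if_neg (by omega : ¬ (PySem.Str.split₀Max (PySem.Str.strip l) 1).length ≠ 2)]
        rw [if_neg (show ¬ pvLstripSlash ((PySem.Str.split₀Max (PySem.Str.strip l) 1).getD 0 "") = ""
          from hnp)]
        rw [if_neg (show ¬ (PySem.Str.split₀Max (PySem.Str.strip l) 1).getD 1 "" = "" from hcid)]
        rw [show PySem.Dict.contains m
            (pvLstripSlash ((PySem.Str.split₀Max (PySem.Str.strip l) 1).getD 0 "")) = false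
          from hcont]
        simp [pvNP, pvCID]
      have hnd' : (pvNP (PySem.Str.strip l) :: pvNPs ls).Nodup := by rw [← hn]; exact hnd
      have hnotmem : pvNP (PySem.Str.strip l) ∉ pvNPs ls := (List.nodup_cons.mp hnd').1
      have hm' : ∀ x ∈ pvNPs ls,
          (m.insert (pvNP (PySem.Str.strip l)) (pvCID (PySem.Str.strip l))).contains x = false := by
        intro x hx
        rw [PySem.Dict.contains_insert]
        have hxne : (x == pvNP (PySem.Str.strip l)) = false := by
          simp only [beq_eq_false_iff_ne, ne_eq]
          rintro rfl
          exact hnotmem hx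
        rw [hxne, hm x (by rw [hn]; exact List.mem_cons_of_mem _ hx)]
        rfl
      rw [hstep, hg, List.foldl_cons]
      exact ih _ (fun l' hl' => hok l' (by rw [hg]; exact List.mem_cons_of_mem _ hl'))
        (List.nodup_cons.mp hnd').2 hm'

-- ===== VERDICT (by name: the statement is the Claim_ definition above) =====
theorem parse_cids_archive_py_spec : Claim_equal_parse_cids_archive_py := by
  intro t _ hPre
  obtain ⟨h1, h2, h3⟩ := hPre
  unfold Spec_parse_cids_archive_py
  have hne : ¬ (t = "" ∨ PySem.Str.strip t = "") := by
    rintro (rfl | h)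
    · exact h1 (by decide)
    · exact h1 h
  unfold parse_cids_archive_py parse_cids_archive_py_alt
  rw [if_neg hne, if_neg hne]
  rw [pvStepA_fold _ _ _ _ h2 h3 (fun x _ => pv_contains_false (by simp))]
  rw [pvStepB_fold _ _ h2 h3 (fun x _ => PySem.Dict.contains_empty x)]
  have hkeys : ((pvGood (PySem.Str.splitlines t)).foldl
        (fun m l => m.insert (pvNP l) (pvCID l)) PySem.Dict.empty).keys
      = pvNPs (PySem.Str.splitlines t) := by
    rw [PySem.Dict.keys_foldl_insert_key (l := pvGood (PySem.Str.splitlines t))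
      (key := pvNP) (f := fun _ l => pvCID l) (d := PySem.Dict.empty)]
    rw [PySem.Dict.keys_empty]
    rw [PySem.Set.update_nil_left]
    exact PySem.Set.ofList_eq_self_of_nodup _ h3
  dsimp only
  rw [hkeys]
  congr 1
  exact PySem.List.foldl_congr_mem _ _ _ _ (fun acc x _ => pvDirsAdd_eq acc x)
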